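-- pv_equiv track=rewrite | github.com/RRoundTable/Data_Structure_Study | 7week/sorting/MaxProductOfThree.py | solution
-- ===== SOURCE A (Python) =====
-- def solution(a):
--
--     a_sorted = sorted(a, reverse=True)
--
--     positive = [ e for e in a_sorted if e >= 0] # O(N)
--     negative = [ e for e in a_sorted if e < 0] # O(N)
--     negative = sorted(negative) # O(NlogN)
--     if len(positive) >= 1: # positive result
--         if len(negative) < 2: # error
--             result =  positive[0] * positive[1] * positive[2]
--             return result
--         if len(positive) == 1 or len(positive) == 2:
--             result = positive[0] * negative[0] * negative[1]
--             return result
--         nproduct = negative[0] * negative[1] * positive[0]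
--         pproduct = positive[0] * positive[1] * positive[2]
--         if pproduct >= nproduct:
--             return pproduct
--         else:
--             return nproduct
--
--     else: # negative result
--
--         result = negative[-1] * negative[-2] * negative[-3]
--
--         return result
-- ===== SOURCE B (Python) =====
-- def solution(a):
--     s = sorted(a)
--     return max(s[-1] * s[-2] * s[-3], s[0] * s[1] * s[-1])
-- ===== Notes on version B (the rewrite author's own statement) =====
-- stated objective: simpler
-- what changed: A sorts descending, partitions into non-negatives and negatives, re-sorts the negatives and walks a four-way case analysis; B sorts once ascending and takes the max of the only two candidate products (three largest, or two smallest times the largest).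
import Mathlib
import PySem

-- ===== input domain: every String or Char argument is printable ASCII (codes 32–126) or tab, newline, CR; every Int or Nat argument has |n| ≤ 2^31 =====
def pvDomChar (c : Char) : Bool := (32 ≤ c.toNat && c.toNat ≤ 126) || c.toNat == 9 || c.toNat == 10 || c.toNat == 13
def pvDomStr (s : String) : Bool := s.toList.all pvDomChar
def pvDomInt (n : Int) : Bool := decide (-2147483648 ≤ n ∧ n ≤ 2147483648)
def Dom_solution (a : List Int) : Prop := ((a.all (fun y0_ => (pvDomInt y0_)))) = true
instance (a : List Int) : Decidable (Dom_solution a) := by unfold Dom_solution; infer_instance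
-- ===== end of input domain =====

-- B replaces A's sort+partition+re-sort+four-way case analysis by one ascending sort
-- and a max of the two candidate products (simpler, same asymptotic cost).


-- shared primitive wrapper: xs[i]; the `.getD 0` default is reached only on inputs
-- outside Pre_solution (where the Python raises IndexError)
def pvGetD (xs : List Int) (i : Int) : Int := (PySem.List.pyGet? xs i).getD 0

-- ===== PORT A =====
def solution (a : List Int) : Int :=
  let a_sorted := PySem.List.sorted a (fun x => x) true
  let positive := a_sorted.filter (fun e => decide (0 ≤ e))
  let negative := PySem.List.sorted (a_sorted.filter (fun e => decide (e < 0))) (fun x => x) false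
  if 1 ≤ positive.length then
    if negative.length < 2 then
      pvGetD positive 0 * pvGetD positive 1 * pvGetD positive 2
    else if positive.length = 1 ∨ positive.length = 2 then
      pvGetD positive 0 * pvGetD negative 0 * pvGetD negative 1
    else
      let nproduct := pvGetD negative 0 * pvGetD negative 1 * pvGetD positive 0
      let pproduct := pvGetD positive 0 * pvGetD positive 1 * pvGetD positive 2
      if nproduct ≤ pproduct then pproduct else nproduct
  else
    pvGetD negative (-1) * pvGetD negative (-2) * pvGetD negative (-3)

-- ===== PORT B =====
def solution_alt (a : List Int) : Int :=
  let s := PySem.List.sorted a (fun x => x) false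
  max (pvGetD s (-1) * pvGetD s (-2) * pvGetD s (-3))
      (pvGetD s 0 * pvGetD s 1 * pvGetD s (-1))

-- ===== PRECONDITION & SPEC =====
-- Pre_ excludes exactly the inputs on which the Python A raises IndexError:
-- fewer than three elements, all-negative lists shorter than three, and
-- (two non-negatives, one negative) lists.
def Pre_solution (a : List Int) : Prop :=
  ((a.filter (fun e => decide (0 ≤ e))).length = 0 ∧ 3 ≤ (a.filter (fun e => decide (e < 0))).length) ∨
  (1 ≤ (a.filter (fun e => decide (0 ≤ e))).length ∧
    (2 ≤ (a.filter (fun e => decide (e < 0))).length ∨ 3 ≤ (a.filter (fun e => decide (0 ≤ e))).length))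
instance (a : List Int) : Decidable (Pre_solution a) := by unfold Pre_solution; infer_instance
def pvWitness_solution : List Int := ([1, 2, -3, -4])

def Spec_solution (a : List Int) (out : Int) : Prop := out = solution_alt a
instance (a : List Int) (out : Int) : Decidable (Spec_solution a out) := by unfold Spec_solution; infer_instance

-- ===== CLAIM (what is proved, stated in full; the proofs are below) =====
def Claim_equal_solution : Prop := ∀ (a : List Int), Dom_solution a → Pre_solution a → Spec_solution a (solution a)

-- ===== LEMMAS AND PROOFS =====

theorem pvGetD_zero (xs : List Int) (h : 0 < xs.length) : pvGetD xs 0 = xs[0] := by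
  simp [pvGetD, PySem.List.pyGet?_zero, List.getElem?_eq_getElem h]

theorem pvGetD_one (xs : List Int) (h : 1 < xs.length) : pvGetD xs 1 = xs[1] := by
  rw [pvGetD, show (1:Int) = ((1:Nat):Int) from rfl, PySem.List.pyGet?_natCast,
    List.getElem?_eq_getElem h]
  rfl

theorem pvGetD_two (xs : List Int) (h : 2 < xs.length) : pvGetD xs 2 = xs[2] := by
  rw [pvGetD, show (2:Int) = ((2:Nat):Int) from rfl, PySem.List.pyGet?_natCast,
    List.getElem?_eq_getElem h]
  rfl

theorem pvGetD_neg1 (xs : List Int) (h : 1 ≤ xs.length) :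
    pvGetD xs (-1) = xs[xs.length - 1]'(by omega) := by
  rw [pvGetD, PySem.List.pyGet?_neg_ofNat xs 1 (by omega) h,
    List.getElem?_eq_getElem (by omega)]
  rfl

theorem pvGetD_neg2 (xs : List Int) (h : 2 ≤ xs.length) :
    pvGetD xs (-2) = xs[xs.length - 2]'(by omega) := by
  rw [pvGetD, PySem.List.pyGet?_neg_ofNat xs 2 (by omega) h,
    List.getElem?_eq_getElem (by omega)]
  rfl

theorem pvGetD_neg3 (xs : List Int) (h : 3 ≤ xs.length) :
    pvGetD xs (-3) = xs[xs.length - 3]'(by omega) := by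
  rw [pvGetD, PySem.List.pyGet?_neg_ofNat xs 3 (by omega) h,
    List.getElem?_eq_getElem (by omega)]
  rfl

theorem split_sorted : ∀ (s : List Int), s.Pairwise (· ≤ ·) →
    s = s.filter (fun e => decide (e < 0)) ++ s.filter (fun e => decide (0 ≤ e))
  | [], _ => rfl
  | x :: t, h => by
    rcases List.pairwise_cons.mp h with ⟨hx, ht⟩
    by_cases hneg : x < 0
    · simp only [List.filter_cons, hneg, decide_true, not_le.mpr hneg, decide_false,
        if_true, List.cons_append]
      exact congrArg (x :: ·) (split_sorted t ht)
    · rw [not_lt] at hneg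
      have hall : ∀ y ∈ t, 0 ≤ y := fun y hy => le_trans hneg (hx y hy)
      have h1 : (x :: t).filter (fun e => decide (e < 0)) = [] := by
        rw [List.filter_eq_nil_iff]
        intro y hy
        rcases List.mem_cons.mp hy with rfl | hy
        · simpa using hneg
        · simpa using not_lt.mpr (hall y hy)
      have h2 : (x :: t).filter (fun e => decide (0 ≤ e)) = x :: t := by
        rw [List.filter_eq_self]
        intro y hy
        rcases List.mem_cons.mp hy with rfl | hy
        · simpa using hneg
        · simpa using hall y hy
      rw [h1, h2, List.nil_append]

theorem pairwise_mono (N : List Int) (h : N.Pairwise (· ≤ ·)) (i j : Nat)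
    (hij : i ≤ j) (hj : j < N.length) : N[i]'(by omega) ≤ N[j] := by
  rcases Nat.lt_or_eq_of_le hij with hlt | rfl
  · exact List.pairwise_iff_getElem.mp h i j (by omega) hj hlt
  · exact le_refl _

theorem arith_allneg (x1 x2 x3 y0 y1 : Int) (hx1 : x1 ≤ 0) (hx3 : x3 ≤ 0)
    (hy1 : y1 ≤ 0) (m0 : y0 ≤ x3) (m1 : y1 ≤ x2) : y0 * y1 * x1 ≤ x1 * x2 * x3 := by
  have t1 : x3 * y1 ≤ y0 * y1 := mul_le_mul_of_nonpos_right m0 hy1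
  have t2 : x3 * x2 ≤ x3 * y1 := mul_le_mul_of_nonpos_left m1 hx3
  nlinarith [mul_le_mul_of_nonpos_right (t2.trans t1) hx1]

theorem arith_allpos (x1 x2 x3 y0 y1 : Int) (hx1 : 0 ≤ x1) (_hx2 : 0 ≤ x2) (hx3 : 0 ≤ x3)
    (_hy0 : 0 ≤ y0) (hy1 : 0 ≤ y1) (m0 : y0 ≤ x3) (m1 : y1 ≤ x2) :
    y0 * y1 * x1 ≤ x1 * x2 * x3 := by
  nlinarith [mul_le_mul_of_nonneg_right (mul_le_mul m0 m1 hy1 hx3) hx1]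

theorem arith_mixed (x1 x2 x3 n p : Int) (hx1 : 0 ≤ x1) (hx2 : 0 ≤ x2) (hx3 : 0 ≤ x3)
    (hn : n ≤ 0) (hp : 0 ≤ p) : n * p * x1 ≤ x1 * x2 * x3 := by
  nlinarith [mul_le_mul_of_nonneg_right (mul_nonpos_iff.mpr (Or.inr ⟨hn, hp⟩)) hx1,
    mul_nonneg (mul_nonneg hx1 hx2) hx3]

theorem arith_onepos (p x1 x2 y0 y1 : Int) (hp : 0 ≤ p) (hx2 : x2 ≤ 0) (hy1 : y1 ≤ 0)
    (m0 : y0 ≤ x2) (m1 : y1 ≤ x1) : p * x1 * x2 ≤ y0 * y1 * p := by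
  have t1 : x2 * x1 ≤ x2 * y1 := mul_le_mul_of_nonpos_left m1 hx2
  have t2 : x2 * y1 ≤ y0 * y1 := mul_le_mul_of_nonpos_right m0 hy1
  nlinarith [mul_le_mul_of_nonneg_right (t1.trans t2) hp]

theorem arith_twopos (p q x y0 y1 : Int) (hp : 0 ≤ p) (hq : 0 ≤ q) (hx : x ≤ 0)
    (hy0 : y0 ≤ 0) (hy1 : y1 ≤ 0) : q * p * x ≤ y0 * y1 * q := by
  have t1 : 0 ≤ y0 * y1 := mul_nonneg_of_nonpos_of_nonpos hy0 hy1
  have t2 : q * p * x ≤ 0 := mul_nonpos_iff.mpr (Or.inl ⟨mul_nonneg hq hp, hx⟩)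
  nlinarith [mul_le_mul_of_nonneg_right t1 hq, t2]

theorem core (N P : List Int)
    (hN : N.Pairwise (· ≤ ·)) (hP : P.Pairwise (· ≤ ·))
    (hn : ∀ x ∈ N, x < 0) (hp : ∀ x ∈ P, 0 ≤ x)
    (hpre : (P.length = 0 ∧ 3 ≤ N.length) ∨ (1 ≤ P.length ∧ (2 ≤ N.length ∨ 3 ≤ P.length))) :
    (if 1 ≤ P.reverse.length then
      if N.length < 2 then
        pvGetD P.reverse 0 * pvGetD P.reverse 1 * pvGetD P.reverse 2
      else if P.reverse.length = 1 ∨ P.reverse.length = 2 then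
        pvGetD P.reverse 0 * pvGetD N 0 * pvGetD N 1
      else
        if pvGetD N 0 * pvGetD N 1 * pvGetD P.reverse 0 ≤
            pvGetD P.reverse 0 * pvGetD P.reverse 1 * pvGetD P.reverse 2 then
          pvGetD P.reverse 0 * pvGetD P.reverse 1 * pvGetD P.reverse 2
        else pvGetD N 0 * pvGetD N 1 * pvGetD P.reverse 0
    else pvGetD N (-1) * pvGetD N (-2) * pvGetD N (-3)) =
    max (pvGetD (N ++ P) (-1) * pvGetD (N ++ P) (-2) * pvGetD (N ++ P) (-3))
        (pvGetD (N ++ P) 0 * pvGetD (N ++ P) 1 * pvGetD (N ++ P) (-1)) := by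
  have hnel : ∀ (i : Nat) (h : i < N.length), N[i] < 0 := fun i h => hn _ (List.getElem_mem h)
  have hpel : ∀ (i : Nat) (h : i < P.length), 0 ≤ P[i] := fun i h => hp _ (List.getElem_mem h)
  have hlen : N.length + P.length = (N ++ P).length := (List.length_append).symm
  have hls : 3 ≤ (N ++ P).length := by rw [← hlen]; omega
  -- the five entries of N ++ P that matter
  rw [pvGetD_neg1 (N ++ P) (by omega), pvGetD_neg2 (N ++ P) (by omega),
    pvGetD_neg3 (N ++ P) (by omega), pvGetD_zero (N ++ P) (by omega),
    pvGetD_one (N ++ P) (by omega)]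
  rcases hpre with ⟨hP0, hN3⟩ | ⟨hP1, hrest⟩
  · -- all-negative branch: P = []
    have hPnil : P = [] := List.length_eq_zero_iff.mp hP0
    subst hPnil
    simp only [List.append_nil] at *
    rw [if_neg (by simp [hP0])]
    rw [pvGetD_neg1 N (by omega), pvGetD_neg2 N (by omega), pvGetD_neg3 N (by omega)]
    have h1 := hnel (N.length - 1) (by omega)
    have h2 := hnel (N.length - 2) (by omega)
    have h3 := hnel (N.length - 3) (by omega)
    have h0 := hnel 0 (by omega)
    have h0' := hnel 1 (by omega)
    have m1 := pairwise_mono N hN 0 (N.length - 3) (by omega) (by omega)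
    have m2 := pairwise_mono N hN 1 (N.length - 2) (by omega) (by omega)
    symm
    rw [max_eq_left]
    exact arith_allneg _ _ _ _ _ h1.le h3.le h0'.le m1 m2
  · -- at least one non-negative
    rw [if_pos (by simpa using hP1)]
    by_cases hN2 : N.length < 2
    · -- fewer than two negatives: Pre forces 3 ≤ P.length
      have hP3 : 3 ≤ P.length := by omega
      rw [if_pos hN2]
      rw [pvGetD_zero P.reverse (by simpa using by omega),
        pvGetD_one P.reverse (by simpa using by omega),
        pvGetD_two P.reverse (by simpa using by omega)]
      simp only [List.getElem_reverse]
      have e1 : (N ++ P)[(N ++ P).length - 1]'(by omega) = P[P.length - 1]'(by omega) := by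
        rw [List.getElem_append_right (by omega)]; congr 1; omega
      have e2 : (N ++ P)[(N ++ P).length - 2]'(by omega) = P[P.length - 2]'(by omega) := by
        rw [List.getElem_append_right (by omega)]; congr 1; omega
      have e3 : (N ++ P)[(N ++ P).length - 3]'(by omega) = P[P.length - 3]'(by omega) := by
        rw [List.getElem_append_right (by omega)]; congr 1; omega
      rw [e1, e2, e3]
      have hq1 := hpel (P.length - 1) (by omega)
      have hq2 := hpel (P.length - 2) (by omega)
      have hq3 := hpel (P.length - 3) (by omega)
      have hr : P.length - 1 - 1 = P.length - 2 := by omega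
      have hr' : P.length - 1 - 2 = P.length - 3 := by omega
      simp only [Nat.sub_zero, hr, hr']
      symm
      rw [max_eq_left]
      have hNl01 : N.length = 0 ∨ N.length = 1 := by omega
      rcases hNl01 with hNl | hNl
      · -- N = []
        have hNnil : N = [] := List.length_eq_zero_iff.mp hNl
        subst hNnil
        simp only [List.nil_append]
        have m1 := pairwise_mono P hP 0 (P.length - 3) (by omega) (by omega)
        have m2 := pairwise_mono P hP 1 (P.length - 2) (by omega) (by omega)
        have g0 := hpel 0 (by omega)
        have g1 := hpel 1 (by omega)
        exact arith_allpos _ _ _ _ _ hq1 hq2 hq3 g0 g1 m1 m2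
      · -- N = [n]
        have f0 : (N ++ P)[0]'(by omega) = N[0]'(by omega) := List.getElem_append_left (by omega)
        have f1 : (N ++ P)[1]'(by omega) = P[0]'(by omega) := by
          rw [List.getElem_append_right (by omega)]; congr 1; omega
        rw [f0, f1]
        have g0 := hnel 0 (by omega)
        have g1 := hpel 0 (by omega)
        exact arith_mixed _ _ _ _ _ hq1 hq2 hq3 g0.le g1
    · -- at least two negatives
      rw [if_neg hN2]
      push_cast at hN2
      have hN2' : 2 ≤ N.length := by omega
      have f0 : (N ++ P)[0]'(by omega) = N[0]'(by omega) := List.getElem_append_left (by omega)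
      have f1 : (N ++ P)[1]'(by omega) = N[1]'(by omega) := List.getElem_append_left (by omega)
      have e1 : (N ++ P)[(N ++ P).length - 1]'(by omega) = P[P.length - 1]'(by omega) := by
        rw [List.getElem_append_right (by omega)]; congr 1; omega
      rw [f0, f1, e1]
      have g0 := hnel 0 (by omega)
      have g1 := hnel 1 (by omega)
      have hq1 := hpel (P.length - 1) (by omega)
      by_cases hP12 : P.reverse.length = 1 ∨ P.reverse.length = 2
      · rw [if_pos hP12]
        simp only [List.length_reverse] at hP12
        rw [pvGetD_zero P.reverse (by simp; omega), List.getElem_reverse,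
          pvGetD_zero N (by omega), pvGetD_one N (by omega)]
        simp only [Nat.sub_zero]
        rcases hP12 with hPl | hPl
        · -- P = [p]
          have e2 : (N ++ P)[(N ++ P).length - 2]'(by omega) = N[N.length - 1]'(by omega) := by
            rw [List.getElem_append_left (by omega)]
            · congr 1; omega
          have e3 : (N ++ P)[(N ++ P).length - 3]'(by omega) = N[N.length - 2]'(by omega) := by
            rw [List.getElem_append_left (by omega)]
            · congr 1; omega
          rw [e2, e3]
          have h1 := hnel (N.length - 1) (by omega)
          have h2 := hnel (N.length - 2) (by omega)
          have m1 := pairwise_mono N hN 0 (N.length - 2) (by omega) (by omega)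
          have m2 := pairwise_mono N hN 1 (N.length - 1) (by omega) (by omega)
          symm
          rw [max_eq_right]
          · ring
          · exact arith_onepos _ _ _ _ _ hq1 h2.le g1.le m1 m2
        · -- P = [p, q]
          have e2 : (N ++ P)[(N ++ P).length - 2]'(by omega) = P[P.length - 2]'(by omega) := by
            rw [List.getElem_append_right (by omega)]; congr 1; omega
          have e3 : (N ++ P)[(N ++ P).length - 3]'(by omega) = N[N.length - 1]'(by omega) := by
            rw [List.getElem_append_left (by omega)]
            · congr 1; omega
          rw [e2, e3]
          have h1 := hnel (N.length - 1) (by omega)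
          have hq2 := hpel (P.length - 2) (by omega)
          symm
          rw [max_eq_right]
          · ring
          · exact arith_twopos _ _ _ _ _ hq2 hq1 h1.le g0.le g1.le
      · -- both three positives and two negatives
        rw [if_neg hP12]
        simp only [List.length_reverse] at hP12
        have hP3 : 3 ≤ P.length := by omega
        rw [pvGetD_zero P.reverse (by simp; omega), pvGetD_one P.reverse (by simp; omega),
          pvGetD_two P.reverse (by simp; omega), pvGetD_zero N (by omega),
          pvGetD_one N (by omega)]
        simp only [List.getElem_reverse]
        have e2 : (N ++ P)[(N ++ P).length - 2]'(by omega) = P[P.length - 2]'(by omega) := by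
          rw [List.getElem_append_right (by omega)]; congr 1; omega
        have e3 : (N ++ P)[(N ++ P).length - 3]'(by omega) = P[P.length - 3]'(by omega) := by
          rw [List.getElem_append_right (by omega)]; congr 1; omega
        rw [e2, e3]
        have hr : P.length - 1 - 1 = P.length - 2 := by omega
        have hr' : P.length - 1 - 2 = P.length - 3 := by omega
        simp only [Nat.sub_zero, hr, hr']
        split_ifs with hc
        · exact (max_eq_left hc).symm
        · exact (max_eq_right (not_le.mp hc).le).symm

-- ===== VERDICT (by name: the statement is the Claim_ definition above) =====
theorem solution_spec : Claim_equal_solution := by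
  intro a _ hpre
  unfold Spec_solution
  have hsP : (PySem.List.sorted a (fun x => x) false).Pairwise (· ≤ ·) :=
    PySem.List.sorted_pairwise a (fun x => x)
  set s := PySem.List.sorted a (fun x => x) false with hs
  set N := s.filter (fun e => decide (e < 0)) with hNdef
  set P := s.filter (fun e => decide (0 ≤ e)) with hPdef
  have hsplit : s = N ++ P := split_sorted s hsP
  have hperm_s : s.Perm a := PySem.List.sorted_perm a (fun x => x) false
  have hperm_r : (PySem.List.sorted a (fun x => x) true).Perm a :=
    PySem.List.sorted_perm a (fun x => x) true
  have hNpw : N.Pairwise (· ≤ ·) := hsP.filter _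
  have hPpw : P.Pairwise (· ≤ ·) := hsP.filter _
  have hNneg : ∀ x ∈ N, x < 0 := by
    intro x hx
    have := List.mem_filter.mp hx
    simpa using this.2
  have hPpos : ∀ x ∈ P, 0 ≤ x := by
    intro x hx
    have := List.mem_filter.mp hx
    simpa using this.2
  have hpos_eq : (PySem.List.sorted a (fun x => x) true).filter (fun e => decide (0 ≤ e)) =
      P.reverse := by
    have hperm : ((PySem.List.sorted a (fun x => x) true).filter
        (fun e => decide (0 ≤ e))).Perm P.reverse :=
      ((hperm_r.filter _).trans ((hperm_s.filter _).symm)).trans P.reverse_perm.symm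
    have h1 : (PySem.List.sorted a (fun x => x) true).Pairwise (fun x y : Int => y ≤ x) :=
      PySem.List.sorted_pairwise_rev a (fun x => x)
    have hpw1 : ((PySem.List.sorted a (fun x => x) true).filter
        (fun e => decide (0 ≤ e))).Pairwise (fun x y : Int => -x ≤ -y) :=
      (h1.filter _).imp (fun h => neg_le_neg h)
    have hpw2 : (P.reverse).Pairwise (fun x y : Int => -x ≤ -y) :=
      List.pairwise_reverse.mpr (hPpw.imp (fun h => neg_le_neg h))
    exact PySem.List.eq_of_perm_of_pairwise_le_of_injective
      (fun x : Int => -x) neg_injective hperm hpw1 hpw2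
  have hneg_eq : PySem.List.sorted
      ((PySem.List.sorted a (fun x => x) true).filter (fun e => decide (e < 0))) (fun x => x) false = N :=
    PySem.List.sorted_id_eq_of_perm_of_pairwise _ _
      ((hperm_s.filter _).trans ((hperm_r.filter _).symm)) hNpw
  have hlP : (a.filter (fun e => decide (0 ≤ e))).length = P.length :=
    ((hperm_s.filter _).symm.length_eq)
  have hlN : (a.filter (fun e => decide (e < 0))).length = N.length :=
    ((hperm_s.filter _).symm.length_eq)
  have hpre' : (P.length = 0 ∧ 3 ≤ N.length) ∨ (1 ≤ P.length ∧ (2 ≤ N.length ∨ 3 ≤ P.length)) := by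
    unfold Pre_solution at hpre
    omega
  simp only [solution, solution_alt]
  rw [hpos_eq, hneg_eq, ← hs, hsplit]
  have := core N P hNpw hPpw hNneg hPpos hpre'
  simpa [List.length_reverse] using this
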